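-- pv_equiv track=rewrite | github.com/GamblerIX/RCloneGUI | app/core/rclone.py | _sanitize_option_value
-- ===== SOURCE A (Python) =====
-- def _sanitize_option_value(value: str) -> str:
--     if value is None:
--         return ""
--     value = str(value)
--     dangerous_chars = [';', '&', '|', '`', '$', '(', ')', '<', '>', '\\']
--     for char in dangerous_chars:
--         value = value.replace(char, '')
--     return value
-- ===== SOURCE B (Python) =====
-- def _sanitize_option_value(value: str) -> str:
--     if value is None:
--         return ""
--     value = str(value)
--     dangerous = {';', '&', '|', '`', '$', '(', ')', '<', '>', '\\'}
--     return ''.join(c for c in value if c not in dangerous)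
-- ===== Notes on version B (the rewrite author's own statement) =====
-- stated objective: simpler
-- what changed: Replaces ten sequential str.replace passes (each rebuilding the whole string) with a single character-filter pass using a set of dangerous characters.
import Mathlib
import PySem

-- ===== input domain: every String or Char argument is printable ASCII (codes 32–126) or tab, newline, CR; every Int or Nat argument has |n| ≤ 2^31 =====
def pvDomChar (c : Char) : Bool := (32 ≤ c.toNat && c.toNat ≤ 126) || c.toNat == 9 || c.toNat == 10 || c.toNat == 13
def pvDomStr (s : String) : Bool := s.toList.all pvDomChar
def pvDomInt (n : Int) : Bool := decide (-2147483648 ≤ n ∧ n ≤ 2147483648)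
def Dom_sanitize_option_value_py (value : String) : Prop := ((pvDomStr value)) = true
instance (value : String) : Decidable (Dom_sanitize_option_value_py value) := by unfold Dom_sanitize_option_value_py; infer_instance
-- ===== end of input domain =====

-- B: single set-membership filter pass over the characters instead of A's ten sequential replace scans; same output (the `value is None` guard is vacuous for a String argument).

-- ===== PORT A =====
-- for char in dangerous_chars: value = value.replace(char, '')
def sanitize_option_value_py (value : String) : String :=
  [";", "&", "|", "`", "$", "(", ")", "<", ">", "\\"].foldl
    (fun v ch => PySem.Str.replace v ch "") value

-- ===== PORT B =====
-- dangerous = {';','&','|','`','$','(',')','<','>','\\'}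
def pvDangerousSet : PySem.Set Char :=
  PySem.Set.ofList [';', '&', '|', '`', '$', '(', ')', '<', '>', '\\']

-- ''.join(c for c in value if c not in dangerous)
def sanitize_option_value_py_alt (value : String) : String :=
  String.ofList (value.toList.filter (fun c => !(pvDangerousSet.contains c)))

-- ===== PRECONDITION & SPEC =====
def Spec_sanitize_option_value_py (value : String) (out : String) : Prop := out = sanitize_option_value_py_alt value
instance (value : String) (out : String) : Decidable (Spec_sanitize_option_value_py value out) := by unfold Spec_sanitize_option_value_py; infer_instance

-- ===== CLAIM (what is proved, stated in full; the proofs are below) =====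
def Claim_equal_sanitize_option_value_py : Prop := ∀ (value : String), Dom_sanitize_option_value_py value → Spec_sanitize_option_value_py value (sanitize_option_value_py value)

-- ===== LEMMAS AND PROOFS =====

-- replace.go with a one-char pattern and empty replacement filters that char out
lemma replace_go_one_char (c : Char) :
    ∀ (fuel : Nat) (l acc : List Char), l.length ≤ fuel →
      PySem.Chars.replace.go [c] [] fuel l acc = acc.reverse ++ l.filter (· ≠ c) := by
  intro fuel
  induction fuel with
  | zero =>
    intro l acc h
    have : l = [] := List.eq_nil_of_length_eq_zero (Nat.le_zero.mp h)
    subst this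
    simp [PySem.Chars.replace.go]
  | succ n ih =>
    intro l acc h
    cases l with
    | nil => simp [PySem.Chars.replace.go]
    | cons x t =>
      by_cases hx : x = c
      · subst hx
        have hp : [x].isPrefixOf (x :: t) = true := by simp [List.isPrefixOf]
        simp only [PySem.Chars.replace.go, hp, if_true]
        rw [ih _ _ (by simpa using Nat.le_of_succ_le_succ h)]
        simp
      · have hp : [c].isPrefixOf (x :: t) = false := by
          simp [List.isPrefixOf]; exact fun h' => (hx h'.symm).elim
        simp only [PySem.Chars.replace.go, hp, Bool.false_eq_true, if_false]
        rw [ih _ _ (by simpa using Nat.le_of_succ_le_succ h)]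
        simp [hx]

-- v.replace(c, '') removes every occurrence of the single character c
lemma replace_one_char (v : String) (c : Char) :
    PySem.Str.replace v (String.ofList [c]) "" = String.ofList (v.toList.filter (· ≠ c)) := by
  apply String.ext
  rw [PySem.Str.toList_replace, PySem.Chars.replace]
  simp only [String.toList_ofList, List.isEmpty_cons, Bool.false_eq_true, if_false]
  simpa using replace_go_one_char c v.toList.length v.toList [] (le_refl _)

-- ===== VERDICT (by name: the statement is the Claim_ definition above) =====
theorem sanitize_option_value_py_spec : Claim_equal_sanitize_option_value_py := by
  intro value _
  show sanitize_option_value_py value = sanitize_option_value_py_alt value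
  unfold sanitize_option_value_py sanitize_option_value_py_alt
  simp only [List.foldl]
  rw [show (";" : String) = String.ofList [';'] from rfl,
      show ("&" : String) = String.ofList ['&'] from rfl,
      show ("|" : String) = String.ofList ['|'] from rfl,
      show ("`" : String) = String.ofList ['`'] from rfl,
      show ("$" : String) = String.ofList ['$'] from rfl,
      show ("(" : String) = String.ofList ['('] from rfl,
      show (")" : String) = String.ofList [')'] from rfl,
      show ("<" : String) = String.ofList ['<'] from rfl,
      show (">" : String) = String.ofList ['>'] from rfl,
      show ("\\" : String) = String.ofList ['\\'] from rfl]
  simp only [replace_one_char]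
  simp only [String.toList_ofList, List.filter_filter]
  congr 1
  apply List.filter_congr
  intro c _
  simp [pvDangerousSet, PySem.Set.ofList, PySem.Set.contains]
  ac_rfl
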